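-- pv_equiv track=rewrite | github.com/madbradsmith/EVOLUM | single_brain_orchestrator_v3_build_6_1.py | merge_character_signals
-- ===== SOURCE A (Python) =====
-- def merge_character_signals(dialogue_counts, dialogue_first, dialogue_support, action_counts, action_first):
--     all_names = set(dialogue_counts) | set(action_counts)
--     scored = []
--
--     for name in all_names:
--         d = dialogue_counts.get(name, 0)
--         a = action_counts.get(name, 0)
--         first = min(dialogue_first.get(name, 99999), action_first.get(name, 99999))
--         score = 0
--         score += d * 2
--         score += dialogue_support.get(name, 0) * 3
--         score += a * 4
--
--         if first < 80:
--             score += 4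
--         elif first < 160:
--             score += 2
--
--         if d > 0 and a > 0:
--             score += 4
--
--         if a >= 3:
--             score += 5
--
--         if d == 1 and a == 0:
--             score -= 2
--
--         scored.append((name, score, d, a, first))
--
--     scored.sort(key=lambda x: (-x[1], x[4], x[0]))
--
--     ordered = []
--     seen = set()
--     for name, score, d, a, first in scored:
--         if name in seen:
--             continue
--         tokens = name.split()
--
--         drop = False
--         if len(tokens) == 1:
--             for other, _, od, oa, _ in scored:
--                 if other == name:
--                     continue
--                 other_tokens = other.split()
--                 if len(other_tokens) > 1 and tokens[0] in other_tokens and (od + oa) >= (d + a):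
--                     drop = True
--                     break
--
--         if not drop:
--             seen.add(name)
--             ordered.append(name)
--
--     stats = {
--         name: {
--             "dialogue_count": dialogue_counts.get(name, 0),
--             "action_count": action_counts.get(name, 0),
--             "first_seen": min(dialogue_first.get(name, 99999), action_first.get(name, 99999)),
--         }
--         for name in ordered
--     }
--     return ordered[:8], stats
-- ===== SOURCE B (Python) =====
-- def merge_character_signals(dialogue_counts, dialogue_first, dialogue_support, action_counts, action_first):
--     # One ranked-record pass with a precomputed per-token best (d+a) dict replacing A's O(n^2) inner scan.
--     names = list(dict.fromkeys(list(dialogue_counts) + list(action_counts)))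
--
--     def record(name):
--         d = dialogue_counts.get(name, 0)
--         a = action_counts.get(name, 0)
--         first = min(dialogue_first.get(name, 99999), action_first.get(name, 99999))
--         score = d * 2 + dialogue_support.get(name, 0) * 3 + a * 4
--         if first < 80:
--             score += 4
--         elif first < 160:
--             score += 2
--         if d > 0 and a > 0:
--             score += 4
--         if a >= 3:
--             score += 5
--         if d == 1 and a == 0:
--             score -= 2
--         return (name, score, d, a, first)
--
--     ranked = sorted((record(n) for n in names), key=lambda x: (-x[1], x[4], x[0]))
--
--     # token -> max (d + a) over multi-token names
--     best = {}
--     for name, _, d, a, _ in ranked: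
--         tokens = name.split()
--         if len(tokens) > 1:
--             for t in tokens:
--                 v = best.get(t)
--                 if v is None or d + a > v:
--                     best[t] = d + a
--
--     ordered = []
--     stats = {}
--     for name, _, d, a, first in ranked:
--         tokens = name.split()
--         if len(tokens) == 1:
--             b = best.get(tokens[0])
--             if b is not None and b >= d + a:
--                 continue
--         ordered.append(name)
--         stats[name] = {"dialogue_count": d, "action_count": a, "first_seen": first}
--     return ordered[:8], stats
-- ===== Notes on version B (the rewrite author's own statement) =====
-- stated objective: faster
-- what changed: Replaces A's O(n^2) drop-check (an inner scan over all scored names for every single-token name) with a token -> max(d+a) dictionary built in one pass, and builds the stats from the already-computed records instead of re-querying the input dicts.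
import Mathlib
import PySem

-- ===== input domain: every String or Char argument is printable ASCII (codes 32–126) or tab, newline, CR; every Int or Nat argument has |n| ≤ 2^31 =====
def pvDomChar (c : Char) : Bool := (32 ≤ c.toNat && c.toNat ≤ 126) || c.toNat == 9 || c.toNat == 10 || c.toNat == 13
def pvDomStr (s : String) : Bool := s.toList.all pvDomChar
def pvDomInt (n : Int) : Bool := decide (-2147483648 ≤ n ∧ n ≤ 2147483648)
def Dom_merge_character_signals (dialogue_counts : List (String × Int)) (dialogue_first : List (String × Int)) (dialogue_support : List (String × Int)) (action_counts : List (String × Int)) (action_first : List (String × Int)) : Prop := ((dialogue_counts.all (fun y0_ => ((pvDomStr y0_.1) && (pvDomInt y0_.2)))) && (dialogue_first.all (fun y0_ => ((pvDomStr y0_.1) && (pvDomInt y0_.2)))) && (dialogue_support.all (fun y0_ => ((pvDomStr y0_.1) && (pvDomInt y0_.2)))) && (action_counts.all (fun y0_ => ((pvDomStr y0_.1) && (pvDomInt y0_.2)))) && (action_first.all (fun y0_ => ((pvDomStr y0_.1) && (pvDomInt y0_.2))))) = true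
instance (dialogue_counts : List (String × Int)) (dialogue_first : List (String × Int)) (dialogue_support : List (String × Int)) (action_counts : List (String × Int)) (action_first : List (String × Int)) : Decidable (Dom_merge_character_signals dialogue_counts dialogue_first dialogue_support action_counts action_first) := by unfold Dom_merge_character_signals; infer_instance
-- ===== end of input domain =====

-- B replaces A's quadratic inner scan (per single-token name, a pass over all scored names) by a
-- token -> max(d+a) dictionary built once, and builds the stats from the already-computed records.
-- The dict arguments are Python dicts: each is materialised with PySem.Dict.ofList (= dict(pairs)).

-- shared helper: the port of Python's stable 'sort(key=lambda x: (-x[1], x[4], x[0]))'.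
-- Exact: a stable sort on a 3-tuple key equals a stable sort by the last component
-- followed by a stable 2-key sort on the first two components.
def mcsSort (xs : List (String × Int × Int × Int × Int)) : List (String × Int × Int × Int × Int) :=
  PySem.List.sorted2 (PySem.List.sorted xs (fun x => x.1) false) (fun x => -x.2.1) (fun x => x.2.2.2.2) false

-- ===== PORT A =====
-- A's inner 'for other ... break' scan deciding whether a single-token name is dropped
def mcsDrop (scored : List (String × Int × Int × Int × Int)) (r : String × Int × Int × Int × Int) : Bool :=
  let tokens := PySem.Str.split₀ r.1
  if tokens.length = 1 then
    scored.any (fun o =>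
      !(o.1 == r.1) && decide ((PySem.Str.split₀ o.1).length > 1)
        && (PySem.Str.split₀ o.1).contains (tokens.headD "")
        && decide (o.2.2.1 + o.2.2.2.1 ≥ r.2.2.1 + r.2.2.2.1))
  else false

-- A's ordered/seen loop body
def mcsStepA (scored : List (String × Int × Int × Int × Int)) (p : List String × PySem.Set String)
    (r : String × Int × Int × Int × Int) : List String × PySem.Set String :=
  if p.2.contains r.1 then p
  else if mcsDrop scored r then p
  else (p.1 ++ [r.1], p.2.add r.1)

def merge_character_signals (dialogue_counts : List (String × Int)) (dialogue_first : List (String × Int)) (dialogue_support : List (String × Int)) (action_counts : List (String × Int)) (action_first : List (String × Int)) : List String × (List (String × List (String × Int))) :=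
  let dcD := PySem.Dict.ofList dialogue_counts
  let dfD := PySem.Dict.ofList dialogue_first
  let dsD := PySem.Dict.ofList dialogue_support
  let acD := PySem.Dict.ofList action_counts
  let afD := PySem.Dict.ofList action_first
  let all_names : PySem.Set String := PySem.Set.union (PySem.Set.ofList dcD.keys) acD.keys
  let scored := all_names.foldl (fun acc name =>
    let d := dcD.getD name 0
    let a := acD.getD name 0
    let first := min (dfD.getD name 99999) (afD.getD name 99999)
    let score : Int := 0
    let score := score + d * 2
    let score := score + dsD.getD name 0 * 3
    let score := score + a * 4
    let score := if first < 80 then score + 4 else if first < 160 then score + 2 else score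
    let score := if d > 0 ∧ a > 0 then score + 4 else score
    let score := if a ≥ 3 then score + 5 else score
    let score := if d = 1 ∧ a = 0 then score - 2 else score
    acc ++ [(name, score, d, a, first)]) []
  let scored := mcsSort scored
  let ordered := (scored.foldl (mcsStepA scored) ([], PySem.Set.empty)).1
  let stats := ordered.map (fun n => (n,
      [("dialogue_count", dcD.getD n 0), ("action_count", acD.getD n 0),
       ("first_seen", min (dfD.getD n 99999) (afD.getD n 99999))]))
  (ordered.take 8, stats)

-- ===== PORT B =====
-- B's per-name record (name, score, d, a, first)
def mcsRecord (dcD dfD dsD acD afD : PySem.Dict String Int) (name : String) : String × Int × Int × Int × Int :=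
  let d := dcD.getD name 0
  let a := acD.getD name 0
  let first := min (dfD.getD name 99999) (afD.getD name 99999)
  let score := d * 2 + dsD.getD name 0 * 3 + a * 4
  let score := if first < 80 then score + 4 else if first < 160 then score + 2 else score
  let score := if d > 0 ∧ a > 0 then score + 4 else score
  let score := if a ≥ 3 then score + 5 else score
  let score := if d = 1 ∧ a = 0 then score - 2 else score
  (name, score, d, a, first)

-- one step of building the token -> max (d + a) dict from one record
def mcsBestStep (b : PySem.Dict String Int) (r : String × Int × Int × Int × Int) : PySem.Dict String Int :=
  let tokens := PySem.Str.split₀ r.1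
  if tokens.length > 1 then
    tokens.foldl (fun b t =>
      match b.get? t with
      | none => b.insert t (r.2.2.1 + r.2.2.2.1)
      | some v => if r.2.2.1 + r.2.2.2.1 > v then b.insert t (r.2.2.1 + r.2.2.2.1) else b) b
  else b

-- B's drop test: one dict lookup
def mcsSkip (best : PySem.Dict String Int) (r : String × Int × Int × Int × Int) : Bool :=
  match PySem.Str.split₀ r.1 with
  | [t] => match best.get? t with
           | some v => decide (v ≥ r.2.2.1 + r.2.2.2.1)
           | none => false
  | _ => false

def mcsStat (r : String × Int × Int × Int × Int) : String × List (String × Int) :=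
  (r.1, [("dialogue_count", r.2.2.1), ("action_count", r.2.2.2.1), ("first_seen", r.2.2.2.2)])

def merge_character_signals_alt (dialogue_counts : List (String × Int)) (dialogue_first : List (String × Int)) (dialogue_support : List (String × Int)) (action_counts : List (String × Int)) (action_first : List (String × Int)) : List String × (List (String × List (String × Int))) :=
  let dcD := PySem.Dict.ofList dialogue_counts
  let dfD := PySem.Dict.ofList dialogue_first
  let dsD := PySem.Dict.ofList dialogue_support
  let acD := PySem.Dict.ofList action_counts
  let afD := PySem.Dict.ofList action_first
  let names := PySem.List.dedup (dcD.keys ++ acD.keys)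
  let ranked := mcsSort (names.map (mcsRecord dcD dfD dsD acD afD))
  let best := ranked.foldl mcsBestStep PySem.Dict.empty
  let out := ranked.foldl (fun (p : List String × List (String × List (String × Int))) r =>
      if mcsSkip best r then p else (p.1 ++ [r.1], p.2 ++ [mcsStat r])) ([], [])
  (out.1.take 8, out.2)

-- ===== PRECONDITION & SPEC =====
def Spec_merge_character_signals (dialogue_counts : List (String × Int)) (dialogue_first : List (String × Int)) (dialogue_support : List (String × Int)) (action_counts : List (String × Int)) (action_first : List (String × Int)) (out : List String × (List (String × List (String × Int)))) : Prop := out = merge_character_signals_alt dialogue_counts dialogue_first dialogue_support action_counts action_first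
instance (dialogue_counts : List (String × Int)) (dialogue_first : List (String × Int)) (dialogue_support : List (String × Int)) (action_counts : List (String × Int)) (action_first : List (String × Int)) (out : List String × (List (String × List (String × Int)))) : Decidable (Spec_merge_character_signals dialogue_counts dialogue_first dialogue_support action_counts action_first out) := by unfold Spec_merge_character_signals; infer_instance

-- ===== CLAIM (what is proved, stated in full; the proofs are below) =====
def Claim_equal_merge_character_signals : Prop := ∀ (dialogue_counts : List (String × Int)) (dialogue_first : List (String × Int)) (dialogue_support : List (String × Int)) (action_counts : List (String × Int)) (action_first : List (String × Int)), Dom_merge_character_signals dialogue_counts dialogue_first dialogue_support action_counts action_first → Spec_merge_character_signals dialogue_counts dialogue_first dialogue_support action_counts action_first (merge_character_signals dialogue_counts dialogue_first dialogue_support action_counts action_first)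


-- ===== LEMMAS AND PROOFS =====

-- the (d+a) contribution of record o to token t (some = o is multi-token and contains t)
def mcsVal (t : String) (o : String × Int × Int × Int × Int) : Option Int :=
  if (PySem.Str.split₀ o.1).length > 1 ∧ t ∈ PySem.Str.split₀ o.1 then some (o.2.2.1 + o.2.2.2.1) else none

-- running optional maximum
def mcsOmax (o : Option Int) (v : Int) : Option Int :=
  some (match o with | none => v | some w => max w v)

theorem mcsOmax_omax (o : Option Int) (v : Int) : mcsOmax (mcsOmax o v) v = mcsOmax o v := by
  cases o <;> simp [mcsOmax, max_assoc]

theorem mcsInner_get (ts : List String) (b : PySem.Dict String Int) (v : Int) (t : String) :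
    (ts.foldl (fun b t' => match b.get? t' with
      | none => b.insert t' v
      | some w => if v > w then b.insert t' v else b) b).get? t
    = if t ∈ ts then mcsOmax (b.get? t) v else b.get? t := by
  induction ts generalizing b with
  | nil => simp
  | cons s ts ih =>
    rw [List.foldl_cons, ih]
    have hb1 : ((match b.get? s with
        | none => b.insert s v
        | some w => if v > w then b.insert s v else b) : PySem.Dict String Int).get? t
        = if s = t then mcsOmax (b.get? t) v else b.get? t := by
      by_cases hst : s = t
      · subst hst
        cases h : b.get? s with
        | none => simp [h, PySem.Dict.get?_insert_self, mcsOmax]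
        | some w =>
          by_cases hv : v > w
          · simp [h, hv, PySem.Dict.get?_insert_self, mcsOmax, max_eq_right (le_of_lt hv)]
          · simp [h, hv, mcsOmax, max_eq_left (not_lt.mp hv)]
      · cases h : b.get? s with
        | none => simp [hst, PySem.Dict.get?_insert_of_ne _ _ (fun he => hst he.symm)]
        | some w =>
          by_cases hv : v > w
          · simp [hst, hv, PySem.Dict.get?_insert_of_ne _ _ (fun he => hst he.symm)]
          · simp [hst, hv]
    rw [hb1]
    by_cases hst : s = t
    · by_cases hts : t ∈ ts <;> simp [hst, hts, List.mem_cons, mcsOmax_omax]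
    · have hst' : ¬ t = s := fun he => hst he.symm
      by_cases hts : t ∈ ts <;> simp [hst, hst', hts, List.mem_cons]

theorem mcsBest_get (l : List (String × Int × Int × Int × Int)) (b : PySem.Dict String Int) (t : String) :
    (l.foldl mcsBestStep b).get? t = (l.filterMap (mcsVal t)).foldl mcsOmax (b.get? t) := by
  induction l generalizing b with
  | nil => simp
  | cons r l ih =>
    rw [List.foldl_cons, ih]
    by_cases hlen : (PySem.Str.split₀ r.1).length > 1
    · by_cases ht : t ∈ PySem.Str.split₀ r.1 <;>
        simp [List.filterMap_cons, mcsVal, mcsBestStep, hlen, ht, mcsInner_get]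
    · simp [List.filterMap_cons, mcsVal, mcsBestStep, hlen]

theorem mcsFoldOmax_iff (l : List Int) (o : Option Int) (s : Int) :
    (∃ m, l.foldl mcsOmax o = some m ∧ s ≤ m) ↔ (∃ w, o = some w ∧ s ≤ w) ∨ ∃ v ∈ l, s ≤ v := by
  induction l generalizing o with
  | nil => simp
  | cons v l ih =>
    rw [List.foldl_cons, ih]
    cases o <;> simp [mcsOmax, le_max_iff] <;> tauto

-- A's inner scan and B's dict lookup decide the same drop
theorem mcs_drop_eq_skip (R : List (String × Int × Int × Int × Int))
    (r : String × Int × Int × Int × Int) :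
    mcsDrop R r = mcsSkip (R.foldl mcsBestStep PySem.Dict.empty) r := by
  rcases h : PySem.Str.split₀ r.1 with _ | ⟨t, _ | ⟨t', ts⟩⟩
  · simp [mcsDrop, mcsSkip, h]
  · have hempty : (PySem.Dict.empty : PySem.Dict String Int).get? t = none := rfl
    have hAiff : (mcsDrop R r = true) ↔ ∃ o ∈ R, ¬ o.1 = r.1 ∧
        (PySem.Str.split₀ o.1).length > 1 ∧ t ∈ PySem.Str.split₀ o.1 ∧
        r.2.2.1 + r.2.2.2.1 ≤ o.2.2.1 + o.2.2.2.1 := by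
      simp [mcsDrop, h, List.any_eq_true, List.contains_eq_mem, and_assoc]
    have hAB : (∃ o ∈ R, ¬ o.1 = r.1 ∧
        (PySem.Str.split₀ o.1).length > 1 ∧ t ∈ PySem.Str.split₀ o.1 ∧
        r.2.2.1 + r.2.2.2.1 ≤ o.2.2.1 + o.2.2.2.1) ↔
        ∃ v ∈ R.filterMap (mcsVal t), r.2.2.1 + r.2.2.2.1 ≤ v := by
      constructor
      · rintro ⟨o, ho, _, hlen, hmem, hge⟩
        exact ⟨o.2.2.1 + o.2.2.2.1,
          List.mem_filterMap.mpr ⟨o, ho, by simp [mcsVal, hlen, hmem]⟩, hge⟩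
      · rintro ⟨v, hv, hge⟩
        rcases List.mem_filterMap.mp hv with ⟨o, ho, hvo⟩
        unfold mcsVal at hvo
        by_cases hc : (PySem.Str.split₀ o.1).length > 1 ∧ t ∈ PySem.Str.split₀ o.1
        · rw [if_pos hc] at hvo
          have hne : ¬ o.1 = r.1 := by
            intro he
            rw [he, h] at hc
            simp at hc
          have hv' := Option.some.inj hvo
          exact ⟨o, ho, hne, hc.1, hc.2, by omega⟩
        · rw [if_neg hc] at hvo
          cases hvo
    have hBiff : (mcsSkip (R.foldl mcsBestStep PySem.Dict.empty) r = true) ↔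
        ∃ m, (R.foldl mcsBestStep PySem.Dict.empty).get? t = some m ∧
          r.2.2.1 + r.2.2.2.1 ≤ m := by
      rcases hg : (R.foldl mcsBestStep PySem.Dict.empty).get? t with _ | m <;>
        simp [mcsSkip, h, hg]
    rw [Bool.eq_iff_iff, hAiff, hAB, hBiff, mcsBest_get, hempty, mcsFoldOmax_iff]
    simp
  · simp [mcsDrop, mcsSkip, h]

-- A's ordered/seen loop is a filter (the seen-check never fires on a duplicate-free list)
theorem mcsLoopA (S : List (String × Int × Int × Int × Int)) :
    ∀ (l : List (String × Int × Int × Int × Int)) (ord : List String) (seen : PySem.Set String),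
    (∀ o ∈ l, seen.contains o.1 = false) → (l.map (·.1)).Nodup →
    (l.foldl (mcsStepA S) (ord, seen)).1
      = ord ++ (l.filter (fun r => !mcsDrop S r)).map (·.1) := by
  intro l
  induction l with
  | nil => simp
  | cons r l ih =>
    intro ord seen hseen hnod
    rw [List.map_cons, List.nodup_cons] at hnod
    have hr : seen.contains r.1 = false := hseen r (List.mem_cons_self ..)
    have hrm : r.1 ∉ seen := by simpa [List.contains_eq_mem] using hr
    rw [List.foldl_cons]
    by_cases hd : mcsDrop S r
    · have hc : ¬ (seen.contains r.1 = true) := by simpa using hrm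
      have hstep : mcsStepA S (ord, seen) r = (ord, seen) := by
        simp only [mcsStepA, if_neg hc, if_pos hd]
      rw [hstep, ih ord seen (fun o ho => hseen o (List.mem_cons_of_mem _ ho)) hnod.2]
      simp [List.filter_cons, hd]
    · have hc : ¬ (seen.contains r.1 = true) := by simpa using hrm
      have hstep : mcsStepA S (ord, seen) r = (ord ++ [r.1], seen.add r.1) := by
        simp only [mcsStepA, if_neg hc, if_neg hd]
      rw [hstep]
      have hadd : seen.add r.1 = seen ++ [r.1] := by simp [PySem.Set.add, hrm]
      have hseen' : ∀ o ∈ l, (seen.add r.1).contains o.1 = false := by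
        intro o ho
        rw [hadd]
        have h1 : seen.contains o.1 = false := hseen o (List.mem_cons_of_mem _ ho)
        have h2 : ¬ r.1 = o.1 := fun he => hnod.1 (he ▸ List.mem_map_of_mem ho)
        simp [List.contains_eq_mem] at h1 ⊢
        exact ⟨h1, fun he => h2 he.symm⟩
      rw [ih (ord ++ [r.1]) (seen.add r.1) hseen' hnod.2]
      simp [List.filter_cons, hd]

-- B's output loop is a filter-map pair
theorem mcsLoopB (best : PySem.Dict String Int) :
    ∀ (l : List (String × Int × Int × Int × Int)) (ord : List String)
      (st : List (String × List (String × Int))),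
    l.foldl (fun (p : List String × List (String × List (String × Int))) r =>
        if mcsSkip best r then p else (p.1 ++ [r.1], p.2 ++ [mcsStat r])) (ord, st)
      = (ord ++ (l.filter (fun r => !mcsSkip best r)).map (·.1),
         st ++ (l.filter (fun r => !mcsSkip best r)).map mcsStat) := by
  intro l
  induction l with
  | nil => simp
  | cons r l ih =>
    intro ord st
    rw [List.foldl_cons]
    by_cases hs : mcsSkip best r
    · simp only [hs, if_pos rfl, ih, List.filter_cons, Bool.not_true, if_neg]
      simp [hs]
    · simp only [hs, if_neg, ih, List.filter_cons]
      simp [hs]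

theorem mcsSort_perm (xs : List (String × Int × Int × Int × Int)) : (mcsSort xs).Perm xs :=
  (PySem.List.sorted2_perm _ _ _ _).trans (PySem.List.sorted_perm _ _ _)

theorem mcsRecord_fst (dcD dfD dsD acD afD : PySem.Dict String Int) (n : String) :
    (mcsRecord dcD dfD dsD acD afD n).1 = n := rfl

theorem mcsStat_record (dcD dfD dsD acD afD : PySem.Dict String Int) (n : String) :
    mcsStat (mcsRecord dcD dfD dsD acD afD n)
      = (n, [("dialogue_count", dcD.getD n 0), ("action_count", acD.getD n 0),
             ("first_seen", min (dfD.getD n 99999) (afD.getD n 99999))]) := rfl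

-- A's score accumulation builds exactly B's record
theorem mcsScored_eq (dcD dfD dsD acD afD : PySem.Dict String Int) :
    ∀ (names : List String) (acc : List (String × Int × Int × Int × Int)),
    names.foldl (fun acc name =>
      let d := dcD.getD name 0
      let a := acD.getD name 0
      let first := min (dfD.getD name 99999) (afD.getD name 99999)
      let score : Int := 0
      let score := score + d * 2
      let score := score + dsD.getD name 0 * 3
      let score := score + a * 4
      let score := if first < 80 then score + 4 else if first < 160 then score + 2 else score
      let score := if d > 0 ∧ a > 0 then score + 4 else score
      let score := if a ≥ 3 then score + 5 else score
      let score := if d = 1 ∧ a = 0 then score - 2 else score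
      acc ++ [(name, score, d, a, first)]) acc
      = acc ++ names.map (mcsRecord dcD dfD dsD acD afD) := by
  intro names
  induction names with
  | nil => simp
  | cons n names ih =>
    intro acc
    rw [List.foldl_cons, ih]
    simp [mcsRecord]

-- ===== VERDICT (by name: the statement is the Claim_ definition above) =====
theorem merge_character_signals_spec : Claim_equal_merge_character_signals := by
  intro dc df ds ac af _
  unfold Spec_merge_character_signals
  simp only [merge_character_signals, merge_character_signals_alt]
  have hnames : PySem.Set.union (PySem.Set.ofList (PySem.Dict.ofList dc).keys)
      ((PySem.Dict.ofList ac : PySem.Dict String Int).keys)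
      = PySem.List.dedup ((PySem.Dict.ofList dc : PySem.Dict String Int).keys
          ++ (PySem.Dict.ofList ac : PySem.Dict String Int).keys) := by
    simp [PySem.Set.union, PySem.List.dedup, PySem.Set.ofList, PySem.Set.update, List.foldl_append]
  rw [hnames, mcsScored_eq, List.nil_append]
  set dcD := (PySem.Dict.ofList dc : PySem.Dict String Int) with hdcD
  set dfD := (PySem.Dict.ofList df : PySem.Dict String Int) with hdfD
  set dsD := (PySem.Dict.ofList ds : PySem.Dict String Int) with hdsD
  set acD := (PySem.Dict.ofList ac : PySem.Dict String Int) with hacD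
  set afD := (PySem.Dict.ofList af : PySem.Dict String Int) with hafD
  set names := PySem.List.dedup (dcD.keys ++ acD.keys) with hnamesdef
  set R := mcsSort (names.map (mcsRecord dcD dfD dsD acD afD)) with hR
  set best := R.foldl mcsBestStep PySem.Dict.empty with hbest
  -- facts about R
  have hperm : (R.map (·.1)).Perm names := by
    have h1 : (R.map (·.1)).Perm ((names.map (mcsRecord dcD dfD dsD acD afD)).map (·.1)) :=
      (mcsSort_perm _).map _
    have h2 : (names.map (mcsRecord dcD dfD dsD acD afD)).map (·.1) = names := by
      rw [List.map_map]
      simp [Function.comp_def, mcsRecord_fst]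
    rw [h2] at h1
    exact h1
  have hnodup : (R.map (·.1)).Nodup := hperm.nodup_iff.mpr (PySem.List.nodup_dedup _)
  have hshape : ∀ r ∈ R, ∃ n, r = mcsRecord dcD dfD dsD acD afD n := by
    intro r hr
    have : r ∈ names.map (mcsRecord dcD dfD dsD acD afD) := (mcsSort_perm _).mem_iff.mp hr
    rcases List.mem_map.mp this with ⟨n, _, he⟩
    exact ⟨n, he.symm⟩
  -- rewrite A's loop, then the drop test, then B's loop
  have hseen0 : ∀ o ∈ R, (PySem.Set.empty : PySem.Set String).contains o.1 = false := by
    intro o _; rfl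
  rw [mcsLoopA R R [] PySem.Set.empty hseen0 hnodup, List.nil_append]
  simp only [mcs_drop_eq_skip R, ← hbest]
  rw [mcsLoopB best R [] [], List.nil_append, List.nil_append]
  -- the two components agree
  simp only [Prod.mk.injEq]
  refine ⟨trivial, ?_⟩
  rw [List.map_map]
  apply List.map_congr_left
  intro r hrmem
  rcases hshape r (List.mem_of_mem_filter hrmem) with ⟨n, rfl⟩
  simp [mcsStat_record, mcsRecord_fst]
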